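-- pv_equiv track=rewrite | github.com/MrCosta57/lwmd_projects | Assignment3/cluster_slurm_script.py | max_of_intersection
-- ===== SOURCE A (Python) =====
-- def max_of_intersection(list1, list2):
--     """
--     Return the max value of the intersection of two sorted list.
--     """
--     max=0
--     i = 0
--     j = 0
--     while i < len(list1) and j < len(list2):
--         elem1=list1[i]
--         elem2=list2[j]
--         if elem1 == elem2:
--             if elem1>max:
--                 max=elem1
--             i += 1
--             j += 1
--         elif elem1 < elem2:
--             i += 1
--         else:
--             j += 1
--     return max
-- ===== SOURCE B (Python) =====
-- def max_of_intersection(list1, list2):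
--     common = set(list1) & set(list2)
--     return max(common | {0})
-- ===== Notes on version B (the rewrite author's own statement) =====
-- stated objective: idiomatic
-- what changed: Replaces the hand-written two-pointer merge over index state with a set intersection followed by a single max over the common elements together with 0 (which reproduces A's max=0 initialisation).
-- outside the precondition, e.g. on max_of_intersection([3, 1], [2, 1]): A returns 0, B returns 1
import Mathlib
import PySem

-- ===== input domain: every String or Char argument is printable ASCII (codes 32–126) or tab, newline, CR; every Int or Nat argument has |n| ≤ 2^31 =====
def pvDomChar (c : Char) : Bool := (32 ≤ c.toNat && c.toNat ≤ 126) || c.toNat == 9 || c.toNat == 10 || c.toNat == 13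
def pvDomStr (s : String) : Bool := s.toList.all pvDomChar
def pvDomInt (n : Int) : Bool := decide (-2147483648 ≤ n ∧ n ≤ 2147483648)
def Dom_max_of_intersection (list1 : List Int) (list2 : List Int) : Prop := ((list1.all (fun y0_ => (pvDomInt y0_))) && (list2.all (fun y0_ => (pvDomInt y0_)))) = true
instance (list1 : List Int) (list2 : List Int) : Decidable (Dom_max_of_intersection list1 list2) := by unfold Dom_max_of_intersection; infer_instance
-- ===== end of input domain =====

-- B replaces A's two-pointer merge with set-intersection-then-max (more idiomatic, same cost);
-- Pre_ restricts to the documented domain of non-decreasing ("sorted") lists.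


-- ===== PORT A =====
-- the while loop over (i, j, max); the two index pointers become structural
-- recursion consuming the two lists from the front, carrying the running max m
def pvGoA : List Int → List Int → Int → Int
  | a :: as, b :: bs, m =>
      if a == b then pvGoA as bs (if a > m then a else m)
      else if a < b then pvGoA as (b :: bs) m
      else pvGoA (a :: as) bs m
  | _, _, m => m
termination_by l1 l2 _ => l1.length + l2.length

def max_of_intersection (list1 : List Int) (list2 : List Int) : Int :=
  pvGoA list1 list2 0

-- ===== PORT B =====
-- common = set(list1) & set(list2); return max(common | {0})
-- (max over a set is order-independent, so consuming the Set with max? is exact;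
--  the none branch is unreachable since 0 is always in the pool)
def max_of_intersection_alt (list1 : List Int) (list2 : List Int) : Int :=
  let common : PySem.Set Int := PySem.Set.inter (PySem.Set.ofList list1) (PySem.Set.ofList list2)
  let pool : PySem.Set Int := PySem.Set.union common (PySem.Set.ofList [0])
  match PySem.List.max? pool (fun x => x) with
  | some v => v
  | none => 0

-- ===== PRECONDITION & SPEC =====
-- Pre_ covers the function's documented natural domain — both inputs non-decreasing
-- ("the intersection of two sorted list") — plus all pairs with empty intersection,
-- where the scan order cannot matter. On unsorted lists sharing an element A still
-- returns, but its merge-scan may skip elements and the value is an artefact of the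
-- scan order, not the max of the intersection; those inputs are excluded.
def Pre_max_of_intersection (list1 : List Int) (list2 : List Int) : Prop :=
  (list1.Pairwise (· ≤ ·) ∧ list2.Pairwise (· ≤ ·)) ∨ (∀ x ∈ list1, x ∉ list2)
instance (list1 : List Int) (list2 : List Int) : Decidable (Pre_max_of_intersection list1 list2) := by unfold Pre_max_of_intersection; infer_instance
def pvWitness_max_of_intersection : List Int × List Int := ([1, 2, 5], [2, 3, 5])

def Spec_max_of_intersection (list1 : List Int) (list2 : List Int) (out : Int) : Prop := out = max_of_intersection_alt list1 list2
instance (list1 : List Int) (list2 : List Int) (out : Int) : Decidable (Spec_max_of_intersection list1 list2 out) := by unfold Spec_max_of_intersection; infer_instance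

-- ===== CLAIM (what is proved, stated in full; the proofs are below) =====
def Claim_equal_max_of_intersection : Prop := ∀ (list1 : List Int) (list2 : List Int), Dom_max_of_intersection list1 list2 → Pre_max_of_intersection list1 list2 → Spec_max_of_intersection list1 list2 (max_of_intersection list1 list2)

-- ===== LEMMAS AND PROOFS =====

-- the common reference value: running max, seeded with 0, over the elements of list1
-- that also occur in list2
def pvRef (list1 list2 : List Int) : Int :=
  (list1.filter (fun a => decide (a ∈ list2))).foldl max 0

theorem pv_le_foldl_max (c : Int) (l : List Int) : c ≤ l.foldl max c := by
  induction l generalizing c with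
  | nil => simp
  | cons x t ih => exact le_trans (le_max_left c x) (ih (max c x))

theorem pv_mem_le_foldl_max (c x : Int) (l : List Int) (hx : x ∈ l) : x ≤ l.foldl max c := by
  induction l generalizing c with
  | nil => cases hx
  | cons y t ih =>
      rcases List.mem_cons.mp hx with h | h
      · subst h; exact le_trans (le_max_right c x) (pv_le_foldl_max _ _)
      · exact ih (max c y) h

theorem pv_foldl_max_le (c B : Int) (l : List Int) (hc : c ≤ B) (h : ∀ x ∈ l, x ≤ B) :
    l.foldl max c ≤ B := by
  induction l generalizing c with
  | nil => simpa using hc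
  | cons x t ih =>
      exact ih (max c x) (max_le hc (h x (List.mem_cons_self)))
        (fun y hy => h y (List.mem_cons_of_mem _ hy))

-- extra copies of a (already absorbed into c) in the membership test do not change the max
theorem pv_absorb (a : Int) (bs : List Int) (l : List Int) :
    ∀ c : Int, a ≤ c → (∀ x ∈ l, a ≤ x) →
    (l.filter (fun x => decide (x ∈ a :: bs))).foldl max c
      = (l.filter (fun x => decide (x ∈ bs))).foldl max c := by
  induction l with
  | nil => intro c _ _; rfl
  | cons x t ih =>
      intro c hac hall
      have hta : ∀ y ∈ t, a ≤ y := fun y hy => hall y (List.mem_cons_of_mem _ hy)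
      by_cases hb : x ∈ bs
      · have h1 : x ∈ a :: bs := List.mem_cons_of_mem _ hb
        simp only [List.filter_cons, hb, h1, decide_true, if_true, List.foldl_cons]
        exact ih (max c x) (le_trans hac (le_max_left _ _)) hta
      · by_cases hxa : x = a
        · subst hxa
          have h1 : x ∈ x :: bs := List.mem_cons_self
          have hmax : max c x = c := max_eq_left hac
          simp only [List.filter_cons, hb, h1, decide_true, decide_false, if_true,
            Bool.false_eq_true, if_false, List.foldl_cons, hmax]
          exact ih c hac hta
        · have h1 : x ∉ a :: bs := by
            intro h; rcases List.mem_cons.mp h with h | h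
            · exact hxa h
            · exact hb h
          simp only [List.filter_cons, hb, h1, decide_false, Bool.false_eq_true, if_false]
          exact ih c hac hta

-- A's merge scan computes the running max (seeded with m) of the common elements,
-- provided both lists are non-decreasing
theorem pvGoA_eq (l1 : List Int) : ∀ (l2 : List Int) (m : Int),
    l1.Pairwise (· ≤ ·) → l2.Pairwise (· ≤ ·) →
    pvGoA l1 l2 m = (l1.filter (fun a => decide (a ∈ l2))).foldl max m := by
  induction l1 with
  | nil => intro l2 m _ _; cases l2 <;> simp [pvGoA]
  | cons a as ih1 =>
      intro l2 m h1 h2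
      induction l2 generalizing m with
      | nil => simp [pvGoA]
      | cons b bs ih2 =>
          have h1' := (List.pairwise_cons.mp h1).2
          have h1h := (List.pairwise_cons.mp h1).1
          have h2' := (List.pairwise_cons.mp h2).2
          have h2h := (List.pairwise_cons.mp h2).1
          rcases lt_trichotomy a b with hab | hab | hab
          · -- a < b : a is in neither b nor bs, drop a
            have hnot : ¬ (a = b ∨ a ∈ bs) := by
              rintro (h | h)
              · omega
              · have := h2h a h; omega
            rw [pvGoA]
            have hne : (a == b) = false := by simp; omega
            simp only [hne, Bool.false_eq_true, if_false, if_pos hab]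
            rw [ih1 (b :: bs) m h1' h2]
            simp [List.mem_cons, hnot]
          · -- a == b : take a into the max, advance both
            subst hab
            have hmem : a ∈ a :: bs := List.mem_cons_self
            rw [pvGoA]
            simp only [BEq.rfl, if_true]
            rw [ih1 bs _ h1' h2']
            have hsel : (if a > m then a else m) = max m a := by
              rcases le_total m a with h | h
              · rw [max_eq_right h]; omega
              · rw [max_eq_left h]; omega
            rw [hsel]
            simp only [List.filter_cons, hmem, decide_true, if_true, List.foldl_cons]
            exact (pv_absorb a bs as (max m a) (le_max_right _ _) h1h).symm
          · -- a > b : b matches nothing in a :: as, drop b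
            rw [pvGoA]
            have hne : (a == b) = false := by simp; omega
            have hnlt : ¬ a < b := by omega
            simp only [hne, Bool.false_eq_true, if_false, if_neg hnlt]
            rw [ih2 m h2']
            apply congrArg (fun l => List.foldl max m l)
            apply List.filter_congr
            intro x hx
            have hbx : b < x := by
              rcases List.mem_cons.mp hx with h | h
              · subst h; exact hab
              · exact lt_of_lt_of_le hab (h1h x h)
            simp only [decide_eq_decide, List.mem_cons]
            constructor
            · exact Or.inr
            · rintro (hc | hc)
              · omega
              · exact hc

-- B's max over the pool equals the reference, for any list with the pool's members
theorem pvAlt_key (l1 l2 : List Int) (pool : List Int)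
    (hmemPool : ∀ x : Int, x ∈ pool ↔ ((x ∈ l1 ∧ x ∈ l2) ∨ x = 0)) :
    (match PySem.List.max? pool (fun x => x) with | some v => v | none => 0) = pvRef l1 l2 := by
  have h0 : (0 : Int) ∈ pool := (hmemPool 0).mpr (Or.inr rfl)
  have hne : pool ≠ [] := by intro h; rw [h] at h0; cases h0
  obtain ⟨v, hv⟩ : ∃ v, PySem.List.max? pool (fun x => x) = some v := by
    cases hmax : PySem.List.max? pool (fun x => x) with
    | none => exact absurd ((PySem.List.max?_eq_none_iff pool (fun x => x)).mp hmax) hne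
    | some v => exact ⟨v, rfl⟩
  rw [hv]
  have hvmem : v ∈ pool := PySem.List.max?_mem hv
  have hvmax : ∀ y ∈ pool, y ≤ v := PySem.List.max?_isMax hv
  have hmemF : ∀ x : Int, x ∈ l1.filter (fun a => decide (a ∈ l2)) ↔ (x ∈ l1 ∧ x ∈ l2) := by
    intro x; simp [List.mem_filter]
  unfold pvRef
  apply le_antisymm
  · rcases (hmemPool v).mp hvmem with h | h
    · exact pv_mem_le_foldl_max 0 v _ ((hmemF v).mpr h)
    · rw [h]; exact pv_le_foldl_max 0 _
  · apply pv_foldl_max_le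
    · exact hvmax 0 h0
    · intro x hx
      exact hvmax x ((hmemPool x).mpr (Or.inl ((hmemF x).mp hx)))

-- B's value equals the reference, with no sortedness assumption
theorem pvAlt_eq (l1 l2 : List Int) : max_of_intersection_alt l1 l2 = pvRef l1 l2 := by
  show (match PySem.List.max?
      (PySem.Set.union (PySem.Set.inter (PySem.Set.ofList l1) (PySem.Set.ofList l2))
        (PySem.Set.ofList [0])) (fun x => x) with
    | some v => v | none => 0) = pvRef l1 l2
  apply pvAlt_key
  intro x
  simp [PySem.Set.mem_union, PySem.Set.mem_inter, PySem.Set.mem_ofList]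

-- on disjoint lists the scan never finds a match and returns its seed
theorem pvGoA_disjoint (l1 : List Int) : ∀ (l2 : List Int) (m : Int),
    (∀ x ∈ l1, x ∉ l2) → pvGoA l1 l2 m = m := by
  induction l1 with
  | nil => intro l2 m _; cases l2 <;> simp [pvGoA]
  | cons a as ih1 =>
      intro l2 m hd
      induction l2 generalizing m with
      | nil => simp [pvGoA]
      | cons b bs ih2 =>
          have hab : ¬ a = b := by
            intro h; exact hd a List.mem_cons_self (h ▸ List.mem_cons_self)
          rw [pvGoA]
          have hne : (a == b) = false := by simpa using hab
          simp only [hne, Bool.false_eq_true, if_false]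
          by_cases hlt : a < b
          · rw [if_pos hlt]
            exact ih1 (b :: bs) m (fun x hx => hd x (List.mem_cons_of_mem _ hx))
          · rw [if_neg hlt]
            exact ih2 m (fun x hx hb => hd x hx (List.mem_cons_of_mem _ hb))

-- ===== VERDICT (by name: the statement is the Claim_ definition above) =====
theorem max_of_intersection_spec : Claim_equal_max_of_intersection := by
  intro l1 l2 _ hpre
  unfold Spec_max_of_intersection max_of_intersection
  rw [pvAlt_eq, pvRef]
  rcases hpre with ⟨hs1, hs2⟩ | hd
  · rw [pvGoA_eq l1 l2 0 hs1 hs2]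
  · rw [pvGoA_disjoint l1 l2 0 hd]
    have : l1.filter (fun a => decide (a ∈ l2)) = [] := by
      rw [List.filter_eq_nil_iff]
      intro x hx
      simpa using hd x hx
    rw [this]
    rfl
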